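-- pv_equiv track=rewrite | github.com/whisprer/wonderbot-v5 | wonderbot/agent.py | _truncate_clause
-- ===== SOURCE A (Python) =====
-- def _truncate_clause(text: str) -> str:
--     lowered = text.lower()
--     separators = [" and next we should ", " and we should ", " but ", " while ", " so that "]
--     cut = len(text)
--     for sep in separators:
--         idx = lowered.find(sep)
--         if idx != -1:
--             cut = min(cut, idx)
--     return text[:cut].strip(" .,:;!?")
-- ===== SOURCE B (Python) =====
-- def _truncate_clause(text: str) -> str:
--     lowered = text.lower()
--     separators = (" and next we should ", " and we should ", " but ", " while ", " so that ")
--     cut = len(text)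
--     for i in range(len(lowered)):
--         if any(lowered.startswith(sep, i) for sep in separators):
--             cut = i
--             break
--     return text[:cut].strip(" .,:;!?")
-- ===== Notes on version B (the rewrite author's own statement) =====
-- stated objective: alternative
-- what changed: Replaced the per-separator find() loop with min-of-indices by a single left-to-right scan that returns at the first position where any separator matches (leftmost-match early exit instead of five full scans).
import Mathlib
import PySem

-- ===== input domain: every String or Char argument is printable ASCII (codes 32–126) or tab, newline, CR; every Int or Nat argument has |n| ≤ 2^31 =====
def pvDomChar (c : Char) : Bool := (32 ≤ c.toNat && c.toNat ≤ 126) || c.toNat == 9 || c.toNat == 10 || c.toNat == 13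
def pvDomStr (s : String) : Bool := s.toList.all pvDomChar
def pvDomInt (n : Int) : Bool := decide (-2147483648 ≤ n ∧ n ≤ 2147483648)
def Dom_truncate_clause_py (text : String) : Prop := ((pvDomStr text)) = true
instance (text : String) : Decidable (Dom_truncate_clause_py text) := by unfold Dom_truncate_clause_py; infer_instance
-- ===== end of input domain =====

-- B replaces per-separator `find` + min with a single left-to-right scan that stops at the
-- first position where any separator matches (alternative decomposition, same cost class).


def pvSeps : List (List Char) :=
  [" and next we should ".toList, " and we should ".toList, " but ".toList,
   " while ".toList, " so that ".toList]

-- ===== PORT A =====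
def truncate_clause_py (text : String) : String :=
  let lowered := PySem.Chars.lower text.toList
  let cut : Int := pvSeps.foldl
    (fun cut sep =>
      let idx := PySem.Chars.find lowered sep
      if idx ≠ -1 then min cut idx else cut)
    (PySem.Chars.len text.toList)
  String.ofList (PySem.Chars.stripChars (PySem.Chars.slice text.toList none (some cut)) " .,:;!?".toList)

-- ===== PORT B =====
-- first index i with any separator a prefix of (suffix starting at i); none if no match
def pvFindSep (seps : List (List Char)) : List Char → Option Nat
  | [] => none
  | c :: rest =>
    if seps.any (fun p => PySem.Chars.startswith (c :: rest) p) then some 0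
    else (pvFindSep seps rest).map (· + 1)

def truncate_clause_py_alt (text : String) : String :=
  let lowered := PySem.Chars.lower text.toList
  let cut : Nat := (pvFindSep pvSeps lowered).getD text.toList.length
  String.ofList (PySem.Chars.stripChars (text.toList.take cut) " .,:;!?".toList)

-- ===== PRECONDITION & SPEC =====
def Spec_truncate_clause_py (text : String) (out : String) : Prop := out = truncate_clause_py_alt text
instance (text : String) (out : String) : Decidable (Spec_truncate_clause_py text out) := by unfold Spec_truncate_clause_py; infer_instance

-- ===== CLAIM (what is proved, stated in full; the proofs are below) =====
def Claim_equal_truncate_clause_py : Prop := ∀ (text : String), Dom_truncate_clause_py text → Spec_truncate_clause_py text (truncate_clause_py text)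

-- ===== LEMMAS AND PROOFS =====

-- predicate: some separator matches at position i of L
def pvHit (L : List Char) (i : Nat) : Prop := ∃ p ∈ pvSeps, p <+: L.drop i

theorem pvSeps_ne_nil : ∀ p ∈ pvSeps, p ≠ [] := by decide

-- A-side fold characterization
def pvFoldA (L : List Char) (seps : List (List Char)) (init : Int) : Int :=
  seps.foldl (fun cut sep =>
    let idx := PySem.Chars.find L sep
    if idx ≠ -1 then min cut idx else cut) init

theorem pvFoldA_le_init (L : List Char) (seps : List (List Char)) (init : Int) :
    pvFoldA L seps init ≤ init := by
  induction seps generalizing init with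
  | nil => simp [pvFoldA]
  | cons s ss ih =>
    simp only [pvFoldA, List.foldl_cons] at *
    split
    · exact le_trans (ih _) (min_le_left _ _)
    · exact ih _

theorem pvFoldA_le_find (L : List Char) (seps : List (List Char)) (init : Int)
    (sep : List Char) (hmem : sep ∈ seps) (h : PySem.Chars.find L sep ≠ -1) :
    pvFoldA L seps init ≤ PySem.Chars.find L sep := by
  induction seps generalizing init with
  | nil => cases hmem
  | cons s ss ih =>
    simp only [pvFoldA, List.foldl_cons] at *
    rcases List.mem_cons.mp hmem with rfl | hmem'
    · simp only [h, if_true, ne_eq, not_false_iff]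
      exact le_trans (pvFoldA_le_init _ _ _) (min_le_right _ _)
    · split
      · exact ih _ hmem'
      · exact ih _ hmem'

theorem le_pvFoldA (L : List Char) (seps : List (List Char)) (init : Int) (x : Int)
    (h0 : x ≤ init)
    (h : ∀ sep ∈ seps, PySem.Chars.find L sep ≠ -1 → x ≤ PySem.Chars.find L sep) :
    x ≤ pvFoldA L seps init := by
  induction seps generalizing init with
  | nil => simp only [pvFoldA, List.foldl_nil]; exact h0
  | cons s ss ih =>
    simp only [pvFoldA, List.foldl_cons]
    split
    · rename_i hne
      exact ih _ (le_min h0 (h s (List.mem_cons_self) hne))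
        (fun sep hm => h sep (List.mem_cons_of_mem _ hm))
    · exact ih _ h0 (fun sep hm => h sep (List.mem_cons_of_mem _ hm))

-- find spec, specialized from PySem
theorem pvFind_spec (L sub : List Char) (h : PySem.Chars.find L sub ≠ -1) :
    0 ≤ PySem.Chars.find L sub ∧ sub <+: L.drop (PySem.Chars.find L sub).toNat ∧
      ∀ i : Nat, i < (PySem.Chars.find L sub).toNat → ¬ sub <+: L.drop i := by
  have h0 : PySem.Chars.findFrom L sub ((0 : Nat) : Int) = PySem.Chars.find L sub := by
    simp only [Nat.cast_zero]; exact PySem.Chars.findFrom_zero L sub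
  have := PySem.Chars.findFrom_natCast_spec L sub 0 (Nat.zero_le _) (by rw [h0]; exact h)
  rw [h0] at this
  exact ⟨by exact_mod_cast this.1, this.2.1, fun i hi => this.2.2 i (Nat.zero_le _) hi⟩

-- pvFindSep spec
theorem pvFindSep_none (L : List Char) (h : pvFindSep pvSeps L = none) :
    ∀ i : Nat, ¬ pvHit L i := by
  induction L with
  | nil =>
    intro i ⟨p, hp, hpre⟩
    simp only [List.drop_nil] at hpre
    exact pvSeps_ne_nil p hp (List.prefix_nil.mp hpre)
  | cons c rest ih =>
    intro i
    simp only [pvFindSep] at h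
    split at h
    · cases h
    · rename_i hno
      cases i with
      | zero =>
        intro ⟨p, hp, hpre⟩
        exact hno (List.any_eq_true.mpr ⟨p, hp, (PySem.Chars.startswith_iff _ _).mpr (by simpa using hpre)⟩)
      | succ j =>
        have hrest : pvFindSep pvSeps rest = none := by
          cases hr : pvFindSep pvSeps rest <;> simp [hr] at h ⊢
        intro ⟨p, hp, hpre⟩
        exact ih hrest j ⟨p, hp, by simpa using hpre⟩

theorem pvFindSep_some (L : List Char) (j : Nat) (h : pvFindSep pvSeps L = some j) :
    j < L.length ∧ pvHit L j ∧ ∀ i : Nat, i < j → ¬ pvHit L i := by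
  induction L generalizing j with
  | nil => cases h
  | cons c rest ih =>
    simp only [pvFindSep] at h
    split at h
    · rename_i hyes
      obtain ⟨p, hp, hsw⟩ := List.any_eq_true.mp hyes
      obtain rfl : j = 0 := by cases h; rfl
      exact ⟨Nat.succ_pos _, ⟨p, hp, by simpa using (PySem.Chars.startswith_iff _ _).mp hsw⟩,
        fun i hi => absurd hi (Nat.not_lt_zero i)⟩
    · rename_i hno
      cases hr : pvFindSep pvSeps rest with
      | none => rw [hr] at h; cases h
      | some k =>
        rw [hr] at h
        obtain rfl : j = k + 1 := by cases h; rfl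
        obtain ⟨hlen, hhit, hmin⟩ := ih k hr
        refine ⟨by simpa using Nat.succ_lt_succ hlen, ?_, ?_⟩
        · obtain ⟨p, hp, hpre⟩ := hhit
          exact ⟨p, hp, by simpa using hpre⟩
        · intro i hi
          cases i with
          | zero =>
            intro ⟨p, hp, hpre⟩
            exact hno (List.any_eq_true.mpr ⟨p, hp, (PySem.Chars.startswith_iff _ _).mpr (by simpa using hpre)⟩)
          | succ m =>
            intro ⟨p, hp, hpre⟩
            exact hmin m (Nat.lt_of_succ_lt_succ hi) ⟨p, hp, by simpa using hpre⟩

-- the two cut values agree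
theorem pvCut_eq (L : List Char) :
    pvFoldA L pvSeps (L.length : Int) = (((pvFindSep pvSeps L).getD L.length : Nat) : Int) := by
  cases hfs : pvFindSep pvSeps L with
  | none =>
    -- no separator occurs: every find is -1, fold stays at length
    simp only [Option.getD_none]
    have hall : ∀ sep ∈ pvSeps, PySem.Chars.find L sep = -1 := by
      intro sep hmem
      by_contra hne
      obtain ⟨_, hpre, _⟩ := pvFind_spec L sep hne
      exact pvFindSep_none L hfs _ ⟨sep, hmem, hpre⟩
    apply le_antisymm (pvFoldA_le_init _ _ _)
    exact le_pvFoldA _ _ _ _ le_rfl (fun sep hm hne => absurd (hall sep hm) hne)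
  | some j =>
    obtain ⟨hjlen, ⟨p, hp, hpre⟩, hmin⟩ := pvFindSep_some L j hfs
    simp only [Option.getD_some]
    apply le_antisymm
    · -- fold ≤ j : p occurs with find p ≤ j
      have hne : PySem.Chars.find L p ≠ -1 := by
        intro hEq
        rw [PySem.Chars.find_eq_neg_one_iff] at hEq
        exact hEq (List.infix_iff_prefix_suffix.mpr ⟨_, hpre, List.drop_suffix j L⟩)
      obtain ⟨hpos, _, hfmin⟩ := pvFind_spec L p hne
      have hle : (PySem.Chars.find L p).toNat ≤ j := by
        by_contra hgt
        exact hfmin j (by omega) hpre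
      calc pvFoldA L pvSeps (L.length : Int) ≤ PySem.Chars.find L p :=
            pvFoldA_le_find L pvSeps _ p hp hne
        _ ≤ (j : Int) := by omega
    · -- j ≤ fold : j ≤ length, and j ≤ every occurring find
      apply le_pvFoldA _ _ _ _ (by exact_mod_cast Nat.le_of_lt hjlen)
      intro sep hm hne
      obtain ⟨hpos, hpre', _⟩ := pvFind_spec L sep hne
      by_contra hlt
      exact hmin (PySem.Chars.find L sep).toNat (by omega) ⟨sep, hm, hpre'⟩

-- ===== VERDICT (by name: the statement is the Claim_ definition above) =====
theorem truncate_clause_py_spec : Claim_equal_truncate_clause_py := by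
  intro text _
  unfold Spec_truncate_clause_py truncate_clause_py truncate_clause_py_alt
  have hlen : (PySem.Chars.lower text.toList).length = text.toList.length := by
    simp [PySem.Chars.lower]
  have hcut := pvCut_eq (PySem.Chars.lower text.toList)
  rw [hlen] at hcut
  simp only [PySem.Chars.len_eq, pvFoldA] at hcut ⊢
  rw [hcut, PySem.Chars.slice_eq_listSlice, PySem.List.slice_to, Int.toNat_natCast]
  exact Int.natCast_nonneg _
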